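-- pv_equiv track=rewrite | github.com/matthew-sudo2/Bulldog-Buddy-Smart-AI-Assistant-Retrieval-Augmented-Generation | models/enhanced_rag_system.py | _is_university_specific_query
-- ===== SOURCE A (Python) =====
-- def _is_university_specific_query(question: str) -> bool:
--     """Check if question is about university-specific matters that would be in the handbook"""
--     university_keywords = [
--         # Academic terms
--         'university', 'college', 'campus', 'student', 'academic', 'semester', 'course', 'class',
--         'enrollment', 'registration', 'transcript', 'grade', 'gpa', 'credit', 'degree',
--         'major', 'minor', 'graduation', 'diploma', 'faculty', 'professor', 'instructor',
--
--         # University services & facilities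
--         'library', 'dormitory', 'housing', 'cafeteria', 'bookstore', 'parking', 'shuttle',
--         'health center', 'counseling', 'financial aid', 'scholarship', 'loan',
--
--         # University policies & procedures
--         'policy', 'procedure', 'requirement', 'prerequisite', 'deadline', 'application',
--         'admission', 'transfer', 'withdrawal', 'drop', 'schedule',
--
--         # University-specific terms that might be in handbook
--         'bulldog', 'handbook', 'catalog', 'syllabus', 'orientation', 'advising'
--     ]
--
--     question_lower = question.lower()
--     return any(keyword in question_lower for keyword in university_keywords)
-- ===== SOURCE B (Python) =====
-- # Keywords indexed by first letter (tail stored without it): one pass over the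
-- # text, at each position only the few keywords starting with that character are
-- # tried, instead of a full substring search per keyword.
-- _KEYWORD_INDEX = {
--     'u': ['niversity'],
--     'c': ['ollege', 'ampus', 'ourse', 'lass', 'redit', 'afeteria', 'ounseling', 'atalog'],
--     's': ['tudent', 'emester', 'huttle', 'cholarship', 'chedule', 'yllabus'],
--     'a': ['cademic', 'pplication', 'dmission', 'dvising'],
--     'e': ['nrollment'],
--     'r': ['egistration', 'equirement'],
--     't': ['ranscript', 'ransfer'],
--     'g': ['rade', 'pa', 'raduation'],
--     'd': ['egree', 'iploma', 'ormitory', 'eadline', 'rop'],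
--     'm': ['ajor', 'inor'],
--     'f': ['aculty', 'inancial aid'],
--     'p': ['rofessor', 'arking', 'olicy', 'rocedure', 'rerequisite'],
--     'i': ['nstructor'],
--     'l': ['ibrary', 'oan'],
--     'h': ['ousing', 'ealth center', 'andbook'],
--     'b': ['ookstore', 'ulldog'],
--     'w': ['ithdrawal'],
--     'o': ['rientation'],
-- }
--
-- def _is_university_specific_query(question: str) -> bool:
--     q = question.lower()
--     for i, c in enumerate(q):
--         for tail in _KEYWORD_INDEX.get(c, ()):
--             if q.startswith(tail, i + 1):
--                 return True
--     return False
-- ===== Notes on version B (the rewrite author's own statement) =====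
-- stated objective: alternative
-- what changed: B replaces A's per-keyword full substring searches with a single left-to-right scan over the lowercased text driven by a first-letter index (dict from initial character to keyword tails), so at each position only the few keywords starting with that character are prefix-tested.
import Mathlib
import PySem

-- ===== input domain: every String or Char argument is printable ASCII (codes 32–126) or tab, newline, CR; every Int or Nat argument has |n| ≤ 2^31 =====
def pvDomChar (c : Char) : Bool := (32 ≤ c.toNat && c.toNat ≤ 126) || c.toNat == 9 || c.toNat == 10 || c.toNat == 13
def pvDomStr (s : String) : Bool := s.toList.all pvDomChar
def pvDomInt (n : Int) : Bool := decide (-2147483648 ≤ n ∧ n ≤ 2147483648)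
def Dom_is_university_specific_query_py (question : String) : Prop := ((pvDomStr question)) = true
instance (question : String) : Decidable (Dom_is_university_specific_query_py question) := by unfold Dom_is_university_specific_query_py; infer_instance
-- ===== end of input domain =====

-- B replaces A's per-keyword substring searches with one scan of the lowercased text
-- using a first-letter index (dict: initial char -> keyword tails); alternative, same cost.

-- ===== PORT A =====
def pvKeywordsA : List String :=
  ["university", "college", "campus", "student", "academic", "semester", "course", "class",
   "enrollment", "registration", "transcript", "grade", "gpa", "credit", "degree",
   "major", "minor", "graduation", "diploma", "faculty", "professor", "instructor",
   "library", "dormitory", "housing", "cafeteria", "bookstore", "parking", "shuttle",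
   "health center", "counseling", "financial aid", "scholarship", "loan",
   "policy", "procedure", "requirement", "prerequisite", "deadline", "application",
   "admission", "transfer", "withdrawal", "drop", "schedule",
   "bulldog", "handbook", "catalog", "syllabus", "orientation", "advising"]

def is_university_specific_query_py (question : String) : Bool :=
  let question_lower := PySem.Str.lower question
  pvKeywordsA.any (fun keyword => PySem.Str.isIn keyword question_lower)

-- ===== PORT B =====
-- the literal dict _KEYWORD_INDEX of Source B: first letter -> tails of the keywords starting with it
def pvKeywordIndex : PySem.Dict Char (List String) :=
  PySem.Dict.ofList
    [('u', ["niversity"]),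
     ('c', ["ollege", "ampus", "ourse", "lass", "redit", "afeteria", "ounseling", "atalog"]),
     ('s', ["tudent", "emester", "huttle", "cholarship", "chedule", "yllabus"]),
     ('a', ["cademic", "pplication", "dmission", "dvising"]),
     ('e', ["nrollment"]),
     ('r', ["egistration", "equirement"]),
     ('t', ["ranscript", "ransfer"]),
     ('g', ["rade", "pa", "raduation"]),
     ('d', ["egree", "iploma", "ormitory", "eadline", "rop"]),
     ('m', ["ajor", "inor"]),
     ('f', ["aculty", "inancial aid"]),
     ('p', ["rofessor", "arking", "olicy", "rocedure", "rerequisite"]),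
     ('i', ["nstructor"]),
     ('l', ["ibrary", "oan"]),
     ('h', ["ousing", "ealth center", "andbook"]),
     ('b', ["ookstore", "ulldog"]),
     ('w', ["ithdrawal"]),
     ('o', ["rientation"])]

-- the 'for i, c in enumerate(q)' loop with early return: recursion over the remaining text;
-- 'q.startswith(tail, i + 1)' is a prefix test of the text after position i
def pvScanB : List Char → Bool
  | [] => false
  | c :: rest =>
      ((pvKeywordIndex.getD c []).any fun tail => PySem.Chars.startswith rest tail.toList)
      || pvScanB rest

def is_university_specific_query_py_alt (question : String) : Bool :=
  let q := PySem.Str.lower question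
  pvScanB q.toList

-- ===== PRECONDITION & SPEC =====
def Spec_is_university_specific_query_py (question : String) (out : Bool) : Prop := out = is_university_specific_query_py_alt question
instance (question : String) (out : Bool) : Decidable (Spec_is_university_specific_query_py question out) := by unfold Spec_is_university_specific_query_py; infer_instance

-- ===== CLAIM =====
def Claim_equal_is_university_specific_query_py : Prop := ∀ (question : String), Dom_is_university_specific_query_py question → Spec_is_university_specific_query_py question (is_university_specific_query_py question)

-- ===== LEMMAS AND PROOFS =====

-- every keyword of A decomposes as (first char, tail) with the tail in the index bucket of that char
theorem pv_factA :
    (pvKeywordsA.all fun k =>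
      match k.toList with
      | [] => false
      | kc :: kt => (pvKeywordIndex.getD kc []).any fun t => t.toList == kt) = true := by
  decide

-- conversely, every (char, tail) entry of the index recomposes to a keyword of A
theorem pv_factB :
    (pvKeywordIndex.items.all fun p =>
      p.2.all fun t => pvKeywordsA.any fun k => k.toList == p.1 :: t.toList) = true := by
  decide

-- a member of d.getD c [] comes from an items entry whose key is c
theorem pv_getD_mem {κ α : Type} [BEq κ] [LawfulBEq κ] (d : PySem.Dict κ (List α)) (c : κ)
    (t : α) (h : t ∈ d.getD c []) : ∃ ts, (c, ts) ∈ d.items ∧ t ∈ ts := by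
  unfold PySem.Dict.getD PySem.Dict.get? at h
  cases hf : d.items.find? (fun p => p.1 == c) with
  | none => rw [hf] at h; simp at h
  | some p =>
    rw [hf] at h
    simp only [Option.map_some, Option.getD_some] at h
    have hmem := List.mem_of_find?_eq_some hf
    have hkey := List.find?_some hf
    simp only [beq_iff_eq] at hkey
    exact ⟨p.2, by rw [← hkey]; exact hmem, h⟩

-- the bucket scan at one position equals A's keyword tests against the text from that position
theorem pv_index_correct (c : Char) (l : List Char) :
    ((pvKeywordIndex.getD c []).any fun t => PySem.Chars.startswith l t.toList)
    = (pvKeywordsA.any fun k => PySem.Chars.startswith (c :: l) k.toList) := by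
  rw [Bool.eq_iff_iff]
  simp only [List.any_eq_true, PySem.Chars.startswith_iff]
  constructor
  · rintro ⟨t, ht, hpre⟩
    obtain ⟨ts, hmem, htts⟩ := pv_getD_mem pvKeywordIndex c t ht
    have hB := pv_factB
    rw [List.all_eq_true] at hB
    have := hB _ hmem
    rw [List.all_eq_true] at this
    have := this _ htts
    rw [List.any_eq_true] at this
    obtain ⟨k, hk, hkeq⟩ := this
    rw [beq_iff_eq] at hkeq
    exact ⟨k, hk, by rw [hkeq]; exact List.cons_prefix_cons.mpr ⟨rfl, hpre⟩⟩
  · rintro ⟨k, hk, hpre⟩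
    have hA := pv_factA
    rw [List.all_eq_true] at hA
    have := hA _ hk
    cases hkl : k.toList with
    | nil => rw [hkl] at this; simp at this
    | cons kc kt =>
      rw [hkl] at this hpre
      rw [List.cons_prefix_cons] at hpre
      obtain ⟨hc, hpre⟩ := hpre
      rw [List.any_eq_true] at this
      obtain ⟨t, ht, hteq⟩ := this
      rw [beq_iff_eq] at hteq
      subst hc
      exact ⟨t, ht, by rw [hteq]; exact hpre⟩

-- the single scan finds a keyword iff some keyword is a substring of the text
theorem pv_scan_eq (l : List Char) :
    pvScanB l = pvKeywordsA.any (fun k => PySem.Chars.isIn k.toList l) := by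
  induction l with
  | nil => decide
  | cons c rest ih =>
    rw [pvScanB, ih, pv_index_correct c rest, Bool.eq_iff_iff]
    simp only [Bool.or_eq_true, List.any_eq_true, PySem.Chars.isIn_iff_infix,
      PySem.Chars.startswith_iff, List.infix_cons_iff]
    constructor
    · rintro (⟨k, hk, h⟩ | ⟨k, hk, h⟩)
      · exact ⟨k, hk, Or.inl h⟩
      · exact ⟨k, hk, Or.inr h⟩
    · rintro ⟨k, hk, h | h⟩
      · exact Or.inl ⟨k, hk, h⟩
      · exact Or.inr ⟨k, hk, h⟩

-- ===== VERDICT =====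
theorem is_university_specific_query_py_spec : Claim_equal_is_university_specific_query_py := by
  intro question _
  unfold Spec_is_university_specific_query_py is_university_specific_query_py
    is_university_specific_query_py_alt
  simp only [PySem.Str.isIn_eq, PySem.Str.toList_lower]
  exact (pv_scan_eq _).symm
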